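-- pv_equiv track=rewrite | github.com/thiagocm1/ATAL | URI_1590_CUARENTA_E_DOIS.py | dfs
-- ===== SOURCE A (Python) =====
-- def dfs(entrada, resto, k, j):
--     maior_Atual = 0
--     if (k == j and entrada > maior_Atual):
--         maior_Atual = entrada
--
--     for i in range(len(resto)):
--         if((entrada & resto[i]) > maior_Atual):
--             calc_Atual = dfs(entrada & resto[i], resto[i+1:], k, j+1)
--             if calc_Atual > maior_Atual:
--                 maior_Atual = calc_Atual
--     return maior_Atual
-- ===== SOURCE B (Python) =====
-- def dfs(entrada, resto, k, j):
--     m = k - j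
--     if m < 0 or m > len(resto):
--         return 0
--     cur = {(entrada, 0)}
--     for _ in range(m):
--         nxt = set()
--         for v, s in cur:
--             for i in range(s, len(resto)):
--                 w = v & resto[i]
--                 if w > 0:
--                     nxt.add((w, i + 1))
--         cur = nxt
--     best = 0
--     for v, _ in cur:
--         if v > 0 and v > best:
--             best = v
--     return best
-- ===== Notes on version B (the rewrite author's own statement) =====
-- stated objective: alternative
-- what changed: A's pruned depth-first recursion over subset chains is replaced by a breadth-first level-by-level expansion of a deduplicated frontier of (AND-value, next-index) states, taking the maximum positive value at the final level; dedup collapses repeated states, so cost is bounded by distinct states per level instead of the full recursion tree.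
import Mathlib
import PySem

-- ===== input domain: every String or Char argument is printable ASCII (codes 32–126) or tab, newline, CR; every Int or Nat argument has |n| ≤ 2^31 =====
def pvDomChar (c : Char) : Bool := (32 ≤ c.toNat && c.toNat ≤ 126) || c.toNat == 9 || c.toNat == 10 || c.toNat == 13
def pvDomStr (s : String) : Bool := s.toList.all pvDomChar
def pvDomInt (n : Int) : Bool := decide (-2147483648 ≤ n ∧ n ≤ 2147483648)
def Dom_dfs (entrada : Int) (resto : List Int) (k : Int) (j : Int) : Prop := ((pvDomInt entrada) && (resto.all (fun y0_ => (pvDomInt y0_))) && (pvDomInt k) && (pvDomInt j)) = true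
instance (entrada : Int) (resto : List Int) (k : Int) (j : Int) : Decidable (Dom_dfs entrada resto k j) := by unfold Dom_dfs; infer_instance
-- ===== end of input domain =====

-- B replaces A's pruned depth-first recursion over subsets by a level-by-level frontier
-- of deduplicated (AND-value, next-index) states (objective: alternative; dedup collapses
-- repeated states on duplicate-heavy inputs).

-- ===== PORT A =====
mutual
-- the body of A: maior_Atual initialised, then the for-loop over resto
def dfs (entrada : Int) (resto : List Int) (k : Int) (j : Int) : Int :=
  dfsLoop entrada k j (if k = j ∧ entrada > 0 then entrada else 0) resto
termination_by (resto.length, 1)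
-- A's for-loop: at index i the element is r and resto[i+1:] is rest
def dfsLoop (entrada : Int) (k : Int) (j : Int) (maior : Int) (l : List Int) : Int :=
  match l with
  | [] => maior
  | r :: rest =>
    if PySem.Int.band entrada r > maior then
      let c := dfs (PySem.Int.band entrada r) rest k (j + 1)
      dfsLoop entrada k j (if c > maior then c else maior) rest
    else
      dfsLoop entrada k j maior rest
termination_by (l.length, 0)
end

-- ===== PORT B =====
-- B's inner loop: expand one frontier pair p over indices range(p.2, len(resto))
def bExpand (resto : List Int) (nxt : PySem.Set (Int × Int)) (p : Int × Int) : PySem.Set (Int × Int) :=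
  (PySem.List.pyRange p.2 (PySem.List.len resto) 1).foldl
    (fun acc i =>
      let w := PySem.Int.band p.1 (PySem.List.pyGetD resto i 0)
      if w > 0 then PySem.Set.add acc (w, i + 1) else acc) nxt

-- B's middle loop: one BFS level (nxt built from all pairs of cur)
def bStep (resto : List Int) (cur : PySem.Set (Int × Int)) : PySem.Set (Int × Int) :=
  cur.foldl (bExpand resto) PySem.Set.empty

def dfs_alt (entrada : Int) (resto : List Int) (k : Int) (j : Int) : Int :=
  let m := k - j
  if m < 0 ∨ m > PySem.List.len resto then 0
  else
    let cur := (PySem.List.pyRange 0 m 1).foldl (fun c _ => bStep resto c)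
                 (PySem.Set.ofList [(entrada, 0)])
    cur.foldl (fun best p => if p.1 > 0 ∧ p.1 > best then p.1 else best) 0

-- ===== PRECONDITION & SPEC =====
def Spec_dfs (entrada : Int) (resto : List Int) (k : Int) (j : Int) (out : Int) : Prop := out = dfs_alt entrada resto k j
instance (entrada : Int) (resto : List Int) (k : Int) (j : Int) (out : Int) : Decidable (Spec_dfs entrada resto k j out) := by unfold Spec_dfs; infer_instance

-- ===== CLAIM (what is proved, stated in full; the proofs are below) =====
def Claim_equal_dfs : Prop := ∀ (entrada : Int) (resto : List Int) (k : Int) (j : Int), Dom_dfs entrada resto k j → Spec_dfs entrada resto k j (dfs entrada resto k j)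

-- ===== LEMMAS AND PROOFS =====

-- Common reference value: the final AND values of all chains of exactly m elements of l
-- (a subsequence), applied to e, whose every prefix AND is strictly positive.
def vals : Nat → Int → List Int → List Int
  | 0, e, _ => [e]
  | _ + 1, _, [] => []
  | m + 1, e, r :: rest =>
      (if PySem.Int.band e r > 0 then vals m (PySem.Int.band e r) rest else []) ++ vals (m + 1) e rest

-- running maximum with start a
def mx (a : Int) (L : List Int) : Int := L.foldl (fun b v => if v > b then v else b) a

def specF (e : Int) (l : List Int) (k : Int) (j : Int) : Int :=
  if k - j < 0 then 0 else mx 0 (vals (k - j).toNat e l)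

theorem band_le_left {a : Int} (b : Int) (h : 0 ≤ a) : PySem.Int.band a b ≤ a := by
  unfold PySem.Int.band
  rw [if_pos h]
  split
  · have := Nat.and_le_left (n := a.toNat) (m := b.toNat); omega
  · have := Nat.sub_le a.toNat (a.toNat &&& (-b - 1).toNat); omega

theorem mx_step (b v : Int) : (if v > b then v else b) = max b v := by
  split <;> omega

theorem mx_cons (a r : Int) (L : List Int) : mx a (r :: L) = mx (max a r) L := by
  simp only [mx, List.foldl_cons]
  congr 1
  split <;> omega

theorem mx_max (L : List Int) (a b : Int) : mx (max a b) L = max a (mx b L) := by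
  induction L generalizing b with
  | nil => simp [mx]
  | cons r L ih =>
    rw [mx_cons, mx_cons, max_assoc, ih]

theorem le_mx_init (a : Int) (L : List Int) : a ≤ mx a L := by
  induction L generalizing a with
  | nil => simp [mx]
  | cons r L ih =>
    rw [mx_cons]
    exact le_trans (le_max_left a r) (ih (max a r))

theorem le_mx_mem {x : Int} {L : List Int} (a : Int) (hx : x ∈ L) : x ≤ mx a L := by
  induction L generalizing a with
  | nil => simp at hx
  | cons r L ih =>
    rw [mx_cons]
    rcases List.mem_cons.mp hx with h | h
    · subst h
      exact le_trans (le_max_right a x) (le_mx_init _ L)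
    · exact ih _ h

theorem mx_le_iff {a b : Int} {L : List Int} : mx a L ≤ b ↔ a ≤ b ∧ ∀ x ∈ L, x ≤ b := by
  induction L generalizing a with
  | nil => simp [mx]
  | cons r L ih =>
    rw [mx_cons, ih]
    simp only [List.mem_cons, max_le_iff]
    constructor
    · rintro ⟨⟨h1, h2⟩, h3⟩
      exact ⟨h1, fun x hx => by rcases hx with rfl | hx; exact h2; exact h3 x hx⟩
    · rintro ⟨h1, h2⟩
      exact ⟨⟨h1, h2 r (Or.inl rfl)⟩, fun x hx => h2 x (Or.inr hx)⟩

theorem mx_append (a : Int) (L M : List Int) : mx a (L ++ M) = mx (mx a L) M := by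
  simp [mx, List.foldl_append]

theorem mx_eq_of_le {a : Int} {L : List Int} (h : ∀ x ∈ L, x ≤ a) : mx a L = a := by
  exact le_antisymm (mx_le_iff.mpr ⟨le_refl a, h⟩) (le_mx_init a L)

theorem mx_congr_mem {L M : List Int} (h : ∀ x, x ∈ L ↔ x ∈ M) : mx 0 L = mx 0 M := by
  apply le_antisymm
  · exact mx_le_iff.mpr ⟨le_mx_init 0 M, fun x hx => le_mx_mem 0 ((h x).mp hx)⟩
  · exact mx_le_iff.mpr ⟨le_mx_init 0 L, fun x hx => le_mx_mem 0 ((h x).mpr hx)⟩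

-- every chain value is at most the (positive) starting value
theorem vals_le {m : Nat} {x : Int} {l : List Int} {v : Int} (hx : 0 < x) (hv : v ∈ vals m x l) :
    v ≤ x := by
  induction l generalizing m x v with
  | nil =>
    cases m with
    | zero => simp [vals] at hv; omega
    | succ m => simp [vals] at hv
  | cons r rest ih =>
    cases m with
    | zero => simp [vals] at hv; omega
    | succ m =>
      simp only [vals, List.mem_append] at hv
      rcases hv with h | h
      · by_cases hb : PySem.Int.band x r > 0
        · rw [if_pos hb] at h
          have h1 := ih hb h
          have h2 := band_le_left r hx.le
          omega
        · rw [if_neg hb] at h; simp at h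
      · exact ih hx h

theorem vals_nil_of_lt {m : Nat} {e : Int} {l : List Int} (h : l.length < m) : vals m e l = [] := by
  induction l generalizing m e with
  | nil =>
    cases m with
    | zero => simp at h
    | succ m => simp [vals]
  | cons r rest ih =>
    cases m with
    | zero => simp at h
    | succ m =>
      simp only [List.length_cons] at h
      simp only [vals, List.append_eq_nil_iff]
      refine ⟨?_, ih (by omega)⟩
      split
      · exact ih (by omega)
      · rfl

-- first-pick characterisation of vals
theorem mem_vals_succ {m : Nat} {e v : Int} {l : List Int} :
    v ∈ vals (m + 1) e l ↔ ∃ i : Nat, ∃ h : i < l.length,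
      0 < PySem.Int.band e l[i] ∧ v ∈ vals m (PySem.Int.band e l[i]) (l.drop (i + 1)) := by
  induction l generalizing e with
  | nil => simp [vals]
  | cons r rest ih =>
    simp only [vals, List.mem_append]
    constructor
    · rintro (h | h)
      · by_cases hb : PySem.Int.band e r > 0
        · rw [if_pos hb] at h
          exact ⟨0, by simp, by simpa using hb, by simpa using h⟩
        · rw [if_neg hb] at h; simp at h
      · rcases ih.mp h with ⟨i, hi, hb, hv⟩
        exact ⟨i + 1, by simpa using hi, by simpa using hb, by simpa using hv⟩
    · rintro ⟨i, hi, hb, hv⟩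
      cases i with
      | zero =>
        left
        rw [if_pos (by simpa using hb)]
        simpa using hv
      | succ i =>
        right
        exact ih.mpr ⟨i, by simpa using hi, by simpa using hb, by simpa using hv⟩

-- ===== A-side =====

theorem dfsLoop_eq_of_nonpos (e k j : Int) {N : Nat}
    (IH : ∀ l' : List Int, l'.length < N → ∀ e' j', dfs e' l' k j' = specF e' l' k j')
    (hm : k - j - 1 < 0) :
    ∀ l : List Int, l.length ≤ N → ∀ a : Int, 0 ≤ a → dfsLoop e k j a l = a := by
  intro l
  induction l with
  | nil => intro _ a _; rw [dfsLoop]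
  | cons r rest ih =>
    intro hl a ha
    have hr : rest.length < N := by simp only [List.length_cons] at hl; omega
    rw [dfsLoop]
    split
    · have hc : dfs (PySem.Int.band e r) rest k (j + 1) = 0 := by
        rw [IH rest hr, specF, if_pos (by omega)]
      rw [hc]
      show dfsLoop e k j (if (0 : Int) > a then 0 else a) rest = a
      rw [if_neg (by omega)]
      exact ih hr.le a ha
    · exact ih hr.le a ha

theorem dfsLoop_eq_of_pos (e k j : Int) {N : Nat}
    (IH : ∀ l' : List Int, l'.length < N → ∀ e' j', dfs e' l' k j' = specF e' l' k j')
    (hm : 1 ≤ k - j) :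
    ∀ l : List Int, l.length ≤ N → ∀ a : Int, 0 ≤ a →
      dfsLoop e k j a l = mx a (vals (k - j).toNat e l) := by
  intro l
  induction l with
  | nil =>
    intro _ a ha
    obtain ⟨d, hd⟩ : ∃ d, (k - j).toNat = d + 1 := ⟨(k - j - 1).toNat, by omega⟩
    rw [dfsLoop, hd]
    simp [vals, mx]
  | cons r rest ih =>
    intro hl a ha
    have hr : rest.length < N := by simp only [List.length_cons] at hl; omega
    obtain ⟨d, hd⟩ : ∃ d, (k - j).toNat = d + 1 := ⟨(k - j - 1).toNat, by omega⟩
    have hd' : d = (k - (j + 1)).toNat := by omega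
    rw [dfsLoop, hd]
    simp only [vals, mx_append]
    split
    · rename_i hb
      have hc : dfs (PySem.Int.band e r) rest k (j + 1)
          = mx 0 (vals d (PySem.Int.band e r) rest) := by
        rw [IH rest hr, specF, if_neg (by omega), ← hd']
      rw [hc]
      show dfsLoop e k j
          (if mx 0 (vals d (PySem.Int.band e r) rest) > a
           then mx 0 (vals d (PySem.Int.band e r) rest) else a) rest = _
      rw [mx_step, ih hr.le _ (le_trans ha (le_max_left a _)), hd]
      congr 1
      rw [if_pos (by omega)]
      have h1 : a = max a 0 := by omega
      conv_rhs => rw [h1]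
      rw [mx_max]
    · rename_i hb
      rw [ih hr.le a ha, hd]
      congr 1
      symm
      apply mx_eq_of_le
      intro x hx
      split at hx
      · rename_i hbp
        have := vals_le hbp hx
        omega
      · simp at hx

theorem dfs_body (e k j : Int) {N : Nat} (l : List Int) (hl : l.length ≤ N)
    (IH : ∀ l' : List Int, l'.length < N → ∀ e' j', dfs e' l' k j' = specF e' l' k j') :
    dfs e l k j = specF e l k j := by
  rw [dfs]
  rcases lt_trichotomy (k - j) 0 with h | h | h
  · have hne : ¬ (k = j ∧ e > 0) := by rintro ⟨h1, -⟩; omega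
    rw [if_neg hne, dfsLoop_eq_of_nonpos e k j IH (by omega) l hl 0 le_rfl, specF, if_pos h]
  · have hkj : k = j := by omega
    subst hkj
    have hinit : (0 : Int) ≤ if k = k ∧ e > 0 then e else 0 := by split <;> omega
    rw [dfsLoop_eq_of_nonpos e k k IH (by omega) l hl _ hinit]
    rw [specF, if_neg (show ¬ (k - k < 0) by omega)]
    have h0 : (k - k).toNat = 0 := by omega
    rw [h0]
    simp only [vals, mx, List.foldl_cons, List.foldl_nil]
    simp
  · have hne : ¬ (k = j ∧ e > 0) := by rintro ⟨h1, -⟩; omega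
    rw [if_neg hne, dfsLoop_eq_of_pos e k j IH (by omega) l hl 0 le_rfl, specF,
      if_neg (show ¬ (k - j < 0) by omega)]

theorem dfs_eq_specF (e : Int) (l : List Int) (k j : Int) : dfs e l k j = specF e l k j := by
  suffices H : ∀ (N : Nat) (l : List Int), l.length ≤ N → ∀ e k j, dfs e l k j = specF e l k j by
    exact H l.length l le_rfl e k j
  intro N
  induction N with
  | zero =>
    intro l hl e k j
    exact dfs_body e k j l hl (fun l' h => absurd h (Nat.not_lt_zero _))
  | succ N ihN =>
    intro l hl e k j
    exact dfs_body e k j l hl (fun l' h e' j' => ihN l' (by omega) e' k j')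

-- ===== B-side =====

-- membership in one expansion
def QStep (resto : List Int) (p x : Int × Int) : Prop :=
  ∃ i : Int, p.2 ≤ i ∧ i < resto.length ∧ 0 < PySem.Int.band p.1 (PySem.List.pyGetD resto i 0) ∧
    x = (PySem.Int.band p.1 (PySem.List.pyGetD resto i 0), i + 1)

theorem mem_fold_add (resto : List Int) (v : Int) :
    ∀ (L : List Int) (acc : PySem.Set (Int × Int)) (x : Int × Int),
    (x ∈ L.foldl (fun acc i =>
        let w := PySem.Int.band v (PySem.List.pyGetD resto i 0)
        if w > 0 then PySem.Set.add acc (w, i + 1) else acc) acc) ↔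
      x ∈ acc ∨ ∃ i ∈ L, 0 < PySem.Int.band v (PySem.List.pyGetD resto i 0) ∧
        x = (PySem.Int.band v (PySem.List.pyGetD resto i 0), i + 1) := by
  intro L
  induction L with
  | nil => simp
  | cons i L ih =>
    intro acc x
    simp only [List.foldl_cons, List.exists_mem_cons_iff]
    by_cases hw : PySem.Int.band v (PySem.List.pyGetD resto i 0) > 0
    · rw [if_pos hw, ih, PySem.Set.mem_add]
      tauto
    · rw [if_neg hw, ih]
      tauto

theorem mem_bExpand {resto : List Int} {nxt : PySem.Set (Int × Int)} {p x : Int × Int} :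
    x ∈ bExpand resto nxt p ↔ x ∈ nxt ∨ QStep resto p x := by
  unfold bExpand QStep
  rw [mem_fold_add]
  simp only [PySem.List.mem_pyRange_one, PySem.List.len_eq]
  constructor
  · rintro (h | ⟨i, ⟨h1, h2⟩, h3, h4⟩)
    · exact Or.inl h
    · exact Or.inr ⟨i, h1, h2, h3, h4⟩
  · rintro (h | ⟨i, h1, h2, h3, h4⟩)
    · exact Or.inl h
    · exact Or.inr ⟨i, ⟨h1, h2⟩, h3, h4⟩

theorem mem_fold_bExpand (resto : List Int) :
    ∀ (L : List (Int × Int)) (acc : PySem.Set (Int × Int)) (x : Int × Int),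
      (x ∈ L.foldl (bExpand resto) acc) ↔ x ∈ acc ∨ ∃ p ∈ L, QStep resto p x := by
  intro L
  induction L with
  | nil => simp
  | cons q L ih =>
    intro acc x
    simp only [List.foldl_cons, List.exists_mem_cons_iff]
    rw [ih]
    rw [show (x ∈ bExpand resto acc q) ↔ _ from mem_bExpand]
    tauto

theorem mem_bStep {resto : List Int} {cur : PySem.Set (Int × Int)} {x : Int × Int} :
    x ∈ bStep resto cur ↔ ∃ p ∈ cur, QStep resto p x := by
  unfold bStep
  rw [mem_fold_bExpand]
  simp [PySem.Set.empty]

-- frontier after t levels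
def ReachP (resto : List Int) (e : Int) : Nat → (Int × Int) → Prop
  | 0, x => x = (e, 0)
  | t + 1, x => ∃ p, ReachP resto e t p ∧ QStep resto p x

theorem mem_frontier {resto : List Int} {e : Int} {t : Nat} {x : Int × Int} :
    x ∈ (bStep resto)^[t] (PySem.Set.ofList [(e, 0)]) ↔ ReachP resto e t x := by
  induction t generalizing x with
  | zero =>
    simp only [Function.iterate_zero_apply, ReachP, PySem.Set.mem_ofList, List.mem_singleton]
  | succ t ih =>
    rw [Function.iterate_succ_apply', mem_bStep]
    simp only [ReachP]
    constructor
    · rintro ⟨p, hp, hq⟩; exact ⟨p, ih.mp hp, hq⟩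
    · rintro ⟨p, hp, hq⟩; exact ⟨p, ih.mpr hp, hq⟩

theorem reach_to_vals {resto : List Int} {e : Int} {t : Nat} {v s : Int}
    (h : ReachP resto e t (v, s)) :
    0 ≤ s ∧ ∀ m w, w ∈ vals m v (resto.drop s.toNat) → w ∈ vals (t + m) e resto := by
  induction t generalizing v s with
  | zero =>
    simp only [ReachP, Prod.mk.injEq] at h
    obtain ⟨rfl, rfl⟩ := h
    exact ⟨le_rfl, fun m w hw => by simpa using hw⟩
  | succ t ih =>
    obtain ⟨⟨u, s₀⟩, hp, i, hi1, hi2, hb, hx⟩ := h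
    obtain ⟨hs₀, hcomp⟩ := ih hp
    simp only [Prod.mk.injEq] at hx
    obtain ⟨rfl, rfl⟩ := hx
    refine ⟨by omega, fun m w hw => ?_⟩
    have hg : PySem.List.pyGetD resto i 0 = resto[i.toNat] :=
      PySem.List.pyGetD_eq_getElem resto 0 (by omega) hi2
    have hlen : i.toNat - s₀.toNat < (resto.drop s₀.toNat).length := by
      simp only [List.length_drop]; omega
    have hidx : (resto.drop s₀.toNat)[i.toNat - s₀.toNat] = resto[i.toNat] := by
      rw [List.getElem_drop]
      congr 1
      omega
    have hstep : w ∈ vals (m + 1) u (resto.drop s₀.toNat) := by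
      rw [mem_vals_succ]
      refine ⟨i.toNat - s₀.toNat, hlen, ?_, ?_⟩
      · rw [hidx, ← hg]; exact hb
      · rw [hidx, ← hg, List.drop_drop]
        have : s₀.toNat + (i.toNat - s₀.toNat + 1) = (i + 1).toNat := by omega
        rw [this]
        exact hw
    have := hcomp (m + 1) w hstep
    have harith : t + (m + 1) = t + 1 + m := by omega
    rwa [harith] at this

theorem vals_to_reach {resto : List Int} {e : Int} (m : Nat) :
    ∀ t u s, ReachP resto e t (u, s) → 0 ≤ s →
      ∀ w, w ∈ vals m u (resto.drop s.toNat) → ∃ s', ReachP resto e (t + m) (w, s') := by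
  induction m with
  | zero =>
    intro t u s hr _ w hw
    simp only [vals, List.mem_singleton] at hw
    subst hw
    exact ⟨s, by simpa using hr⟩
  | succ m ih =>
    intro t u s hr hs w hw
    rw [mem_vals_succ] at hw
    obtain ⟨i', hlen, hb, hw⟩ := hw
    have hlen' : s.toNat + i' < resto.length := by
      simp only [List.length_drop] at hlen; omega
    have hidx : (resto.drop s.toNat)[i'] = resto[s.toNat + i'] := List.getElem_drop
    have hg : PySem.List.pyGetD resto (s + i') 0 = resto[s.toNat + i'] := by
      rw [PySem.List.pyGetD_eq_getElem resto 0 (by omega) (by omega)]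
      congr 1
      omega
    have hq : QStep resto (u, s) (PySem.Int.band u resto[s.toNat + i'], (s + i') + 1) := by
      refine ⟨s + i', by omega, by omega, ?_, ?_⟩
      · rw [hg]; rw [hidx] at hb; exact hb
      · rw [hg]
    have hr' : ReachP resto e (t + 1) (PySem.Int.band u resto[s.toNat + i'], (s + i') + 1) :=
      ⟨(u, s), hr, hq⟩
    have hw' : w ∈ vals m (PySem.Int.band u resto[s.toNat + i']) (resto.drop ((s + i' + 1)).toNat) := by
      rw [hidx] at hw
      rw [List.drop_drop] at hw
      have : s.toNat + (i' + 1) = (s + i' + 1).toNat := by omega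
      rwa [this] at hw
    obtain ⟨s', hs'⟩ := ih (t + 1) _ _ hr' (by omega) w hw'
    have harith : t + 1 + m = t + (m + 1) := by omega
    exact ⟨s', by rwa [harith] at hs'⟩

theorem foldl_const_iterate {α : Type} (f : α → α) (L : List Int) (a : α) :
    L.foldl (fun c _ => f c) a = f^[L.length] a := by
  induction L generalizing a with
  | nil => simp
  | cons i L ih =>
    simp only [List.foldl_cons, List.length_cons, Function.iterate_succ_apply]
    exact ih (f a)

theorem foldl_best_eq_mx (P : List (Int × Int)) : ∀ a : Int, 0 ≤ a →
    P.foldl (fun best p => if p.1 > 0 ∧ p.1 > best then p.1 else best) a = mx a (P.map Prod.fst) := by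
  induction P with
  | nil => intro a _; simp [mx]
  | cons p P ih =>
    intro a ha
    simp only [List.foldl_cons, List.map_cons]
    rw [mx_cons]
    by_cases hc : p.1 > a
    · rw [if_pos ⟨by omega, hc⟩]
      rw [ih p.1 (by omega)]
      congr 1
      omega
    · rw [if_neg (by rintro ⟨-, h2⟩; omega)]
      rw [ih a ha]
      congr 1
      omega

theorem dfs_alt_eq_specF (e : Int) (l : List Int) (k j : Int) : dfs_alt e l k j = specF e l k j := by
  simp only [dfs_alt, PySem.List.len_eq]
  by_cases h1 : k - j < 0 ∨ k - j > (l.length : Int)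
  · rw [if_pos h1]
    rw [specF]
    rcases h1 with h1 | h1
    · rw [if_pos h1]
    · rw [if_neg (show ¬ (k - j < 0) by omega)]
      rw [vals_nil_of_lt (show l.length < (k - j).toNat by omega)]
      simp [mx]
  · rw [if_neg h1]
    have h2 : 0 ≤ k - j ∧ k - j ≤ (l.length : Int) := by omega
    have hkj : k - j = ((k - j).toNat : Int) := by omega
    rw [hkj, PySem.List.pyRange_zero_natCast ((k - j).toNat)]
    rw [foldl_const_iterate]
    rw [List.length_map, List.length_range]
    rw [foldl_best_eq_mx _ 0 le_rfl]
    rw [specF, if_neg (show ¬ (k - j < 0) by omega)]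
    apply mx_congr_mem
    intro x
    simp only [List.mem_map]
    constructor
    · rintro ⟨⟨v, s⟩, hmem, rfl⟩
      have hr := mem_frontier.mp hmem
      obtain ⟨hs, hcomp⟩ := reach_to_vals hr
      have := hcomp 0 v (by simp [vals])
      simpa using this
    · intro hx
      have h0 : ReachP l e 0 (e, 0) := rfl
      obtain ⟨s', hs'⟩ := vals_to_reach ((k - j).toNat) 0 e 0 h0 le_rfl x (by simpa using hx)
      exact ⟨(x, s'), mem_frontier.mpr (by simpa using hs'), rfl⟩

-- ===== VERDICT (by name: the statement is the Claim_ definition above) =====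
theorem dfs_spec : Claim_equal_dfs := by
  intro e l k j _
  unfold Spec_dfs
  rw [dfs_eq_specF, dfs_alt_eq_specF]
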